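-- pv_equiv track=rewrite | github.com/Ashutosh-Gera/IP_Assignments | Assignment 2/A2_2021026_4.py | evaluate
-- ===== SOURCE A (Python) =====
-- def evaluate(l1,l2):
--     #l1=list of student marked options
--     #l2=list of answer key's options
--     marks=0
--     for i in range(len(l1)):
--         if l1[i]==l2[i]:
--             marks+=4
--         else:
--             if l1[i]=='-':
--                 pass
--             else:
--                 marks-=1
--     return marks
-- ===== SOURCE B (Python) =====
-- def evaluate(l1, l2):
--     correct = sum(1 for i in range(len(l1)) if l1[i] == l2[i])
--     wrong = sum(1 for i in range(len(l1)) if l1[i] != l2[i] and l1[i] != '-')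
--     return 4 * correct - wrong
-- ===== Notes on version B (the rewrite author's own statement) =====
-- stated objective: alternative
-- what changed: Replaces the running marks accumulator with two aggregate counts (correct and penalised-wrong indices) combined by the closed-form 4*correct - wrong.
import Mathlib
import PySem

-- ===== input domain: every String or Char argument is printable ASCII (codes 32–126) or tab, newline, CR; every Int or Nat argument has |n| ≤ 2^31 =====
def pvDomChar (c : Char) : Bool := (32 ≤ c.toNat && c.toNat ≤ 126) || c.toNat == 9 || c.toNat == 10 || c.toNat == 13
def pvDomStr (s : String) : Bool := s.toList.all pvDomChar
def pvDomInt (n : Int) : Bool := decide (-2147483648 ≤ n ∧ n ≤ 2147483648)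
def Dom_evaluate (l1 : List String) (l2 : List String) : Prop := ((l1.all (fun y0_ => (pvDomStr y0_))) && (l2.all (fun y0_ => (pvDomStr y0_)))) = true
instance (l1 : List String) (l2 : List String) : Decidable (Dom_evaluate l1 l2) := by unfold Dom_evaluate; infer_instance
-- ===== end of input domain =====

-- ===== PORT A =====
-- B recomputes A's total from two aggregate index counts via 4*correct - wrong (alternative decomposition).
-- Port of A: running accumulator over range(len(l1)); l2[i] out of range (Python IndexError) is excluded by Pre_.
def evaluate (l1 : List String) (l2 : List String) : Int :=
  (PySem.List.pyRange 0 l1.length 1).foldl (fun marks i =>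
    if PySem.List.pyGet? l1 i = PySem.List.pyGet? l2 i then marks + 4
    else if PySem.List.pyGet? l1 i = some "-" then marks
    else marks - 1) 0

-- ===== PORT B =====
def evaluate_alt (l1 : List String) (l2 : List String) : Int :=
  let idx := PySem.List.pyRange 0 l1.length 1
  let correct : Int := idx.countP (fun i => decide (PySem.List.pyGet? l1 i = PySem.List.pyGet? l2 i))
  let wrong : Int := idx.countP (fun i =>
    decide (¬ PySem.List.pyGet? l1 i = PySem.List.pyGet? l2 i) &&
    decide (¬ PySem.List.pyGet? l1 i = some "-"))
  4 * correct - wrong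

-- ===== PRECONDITION & SPEC =====
-- Pre_ excludes exactly the inputs where Python A raises IndexError: l2 shorter than l1.
def Pre_evaluate (l1 : List String) (l2 : List String) : Prop := l1.length ≤ l2.length
instance (l1 : List String) (l2 : List String) : Decidable (Pre_evaluate l1 l2) := by unfold Pre_evaluate; infer_instance
def pvWitness_evaluate : List String × List String := (["a", "-", "b"], ["a", "c", "d"])
def Spec_evaluate (l1 : List String) (l2 : List String) (out : Int) : Prop := out = evaluate_alt l1 l2
instance (l1 : List String) (l2 : List String) (out : Int) : Decidable (Spec_evaluate l1 l2 out) := by unfold Spec_evaluate; infer_instance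

-- ===== CLAIM (what is proved, stated in full; the proofs are below) =====
def Claim_equal_evaluate : Prop := ∀ (l1 : List String) (l2 : List String), Dom_evaluate l1 l2 → Pre_evaluate l1 l2 → Spec_evaluate l1 l2 (evaluate l1 l2)

-- ===== LEMMAS AND PROOFS =====

lemma evaluate_fold_counts (l1 l2 : List String) (L : List Int) (m : Int) :
    L.foldl (fun marks i =>
      if PySem.List.pyGet? l1 i = PySem.List.pyGet? l2 i then marks + 4
      else if PySem.List.pyGet? l1 i = some "-" then marks
      else marks - 1) m
    = m + 4 * (L.countP (fun i => decide (PySem.List.pyGet? l1 i = PySem.List.pyGet? l2 i)) : Int)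
        - (L.countP (fun i =>
            decide (¬ PySem.List.pyGet? l1 i = PySem.List.pyGet? l2 i) &&
            decide (¬ PySem.List.pyGet? l1 i = some "-")) : Int) := by
  induction L generalizing m with
  | nil => simp
  | cons i L ih =>
    simp only [List.foldl_cons, List.countP_cons, ih]
    by_cases h1 : PySem.List.pyGet? l1 i = PySem.List.pyGet? l2 i
    · simp only [h1, if_true]
      simp; push_cast; ring
    · by_cases h2 : PySem.List.pyGet? l1 i = some "-"
      · have h3 : ¬ ((some "-" : Option String) = PySem.List.pyGet? l2 i) := fun e => h1 (h2.trans e)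
        simp [h2, h3]
      · simp [h1, h2]; push_cast; ring

-- ===== VERDICT (by name: the statement is the Claim_ definition above) =====
theorem evaluate_spec : Claim_equal_evaluate := by
  intro l1 l2 _ _
  unfold Spec_evaluate evaluate evaluate_alt
  rw [evaluate_fold_counts]
  ring
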